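-- pv_equiv track=rewrite | github.com/marcosmlslira/observadordedominios | backend/app/services/state_aggregator.py | derive_risk_from_signals
-- ===== SOURCE A (Python) =====
-- def derive_risk_from_signals(signal_codes: list[str]) -> str:
--     """Derive risk level from the highest-severity signal present."""
--     CRITICAL_SIGNALS = {
--         "credential_collection_surface", "safe_browsing_hit",
--         "phishtank_verified_phish", "certificate_revoked",
--     }
--     HIGH_SIGNALS = {
--         "recent_registration", "mail_only_infrastructure",
--         "brand_impersonation_content", "phishtank_in_database",
--         "urlhaus_malware_listed", "high_spoofing_risk",
--     }
--     MEDIUM_SIGNALS = {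
--         "fresh_registration", "live_http_surface", "unusual_hosting_country",
--         "shielded_hosting_provider", "elevated_spoofing_risk",
--     }
--     if any(s in signal_codes for s in CRITICAL_SIGNALS):
--         return "critical"
--     if any(s in signal_codes for s in HIGH_SIGNALS):
--         return "high"
--     if any(s in signal_codes for s in MEDIUM_SIGNALS):
--         return "medium"
--     return "low"
-- ===== SOURCE B (Python) =====
-- SEVERITY = {
--     "credential_collection_surface": 3, "safe_browsing_hit": 3,
--     "phishtank_verified_phish": 3, "certificate_revoked": 3,
--     "recent_registration": 2, "mail_only_infrastructure": 2,
--     "brand_impersonation_content": 2, "phishtank_in_database": 2,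
--     "urlhaus_malware_listed": 2, "high_spoofing_risk": 2,
--     "fresh_registration": 1, "live_http_surface": 1,
--     "unusual_hosting_country": 1, "shielded_hosting_provider": 1,
--     "elevated_spoofing_risk": 1,
-- }
--
-- LABEL = {3: "critical", 2: "high", 1: "medium", 0: "low"}
--
--
-- def derive_risk_from_signals(signal_codes: list[str]) -> str:
--     """Derive risk level from the highest-severity signal present."""
--     worst = 0
--     for code in signal_codes:
--         worst = max(worst, SEVERITY.get(code, 0))
--     return LABEL.get(worst, "low")
-- ===== Notes on version B (the rewrite author's own statement) =====
-- stated objective: idiomatic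
-- what changed: Replaces three ordered membership scans over tier sets by a single pass over signal_codes keeping the running maximum of a precomputed code->rank dict, then translating the max rank to its label.
import Mathlib
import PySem

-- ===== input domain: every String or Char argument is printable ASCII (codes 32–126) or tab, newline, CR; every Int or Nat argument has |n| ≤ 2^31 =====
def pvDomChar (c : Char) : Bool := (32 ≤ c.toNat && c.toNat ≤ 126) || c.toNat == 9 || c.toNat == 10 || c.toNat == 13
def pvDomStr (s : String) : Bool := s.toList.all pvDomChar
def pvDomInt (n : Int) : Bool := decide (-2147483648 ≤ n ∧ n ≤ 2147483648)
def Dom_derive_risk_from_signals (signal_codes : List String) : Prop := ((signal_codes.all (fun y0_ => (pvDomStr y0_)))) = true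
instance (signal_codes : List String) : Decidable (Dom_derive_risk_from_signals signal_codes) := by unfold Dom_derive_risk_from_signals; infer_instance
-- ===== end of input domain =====

-- B replaces A's three ordered membership scans over tier sets by one pass over the
-- input keeping the running maximum of a precomputed code→rank dict (objective: idiomatic).

-- ===== PORT A =====
def criticalSignals : PySem.Set String := PySem.Set.ofList
  ["credential_collection_surface", "safe_browsing_hit",
   "phishtank_verified_phish", "certificate_revoked"]
def highSignals : PySem.Set String := PySem.Set.ofList
  ["recent_registration", "mail_only_infrastructure",
   "brand_impersonation_content", "phishtank_in_database",
   "urlhaus_malware_listed", "high_spoofing_risk"]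
def mediumSignals : PySem.Set String := PySem.Set.ofList
  ["fresh_registration", "live_http_surface", "unusual_hosting_country",
   "shielded_hosting_provider", "elevated_spoofing_risk"]

def derive_risk_from_signals (signal_codes : List String) : String :=
  if criticalSignals.any (fun s => signal_codes.contains s) then "critical"
  else if highSignals.any (fun s => signal_codes.contains s) then "high"
  else if mediumSignals.any (fun s => signal_codes.contains s) then "medium"
  else "low"

-- ===== PORT B =====
def severityDict : PySem.Dict String Int := PySem.Dict.ofList
  [("credential_collection_surface", 3), ("safe_browsing_hit", 3),
   ("phishtank_verified_phish", 3), ("certificate_revoked", 3),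
   ("recent_registration", 2), ("mail_only_infrastructure", 2),
   ("brand_impersonation_content", 2), ("phishtank_in_database", 2),
   ("urlhaus_malware_listed", 2), ("high_spoofing_risk", 2),
   ("fresh_registration", 1), ("live_http_surface", 1),
   ("unusual_hosting_country", 1), ("shielded_hosting_provider", 1),
   ("elevated_spoofing_risk", 1)]

def labelDict : PySem.Dict Int String :=
  PySem.Dict.ofList [(3, "critical"), (2, "high"), (1, "medium"), (0, "low")]

def derive_risk_from_signals_alt (signal_codes : List String) : String :=
  let worst := signal_codes.foldl
    (fun worst code => max worst (severityDict.getD code 0)) 0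
  labelDict.getD worst "low"

-- ===== PRECONDITION & SPEC =====
def Spec_derive_risk_from_signals (signal_codes : List String) (out : String) : Prop := out = derive_risk_from_signals_alt signal_codes
instance (signal_codes : List String) (out : String) : Decidable (Spec_derive_risk_from_signals signal_codes out) := by unfold Spec_derive_risk_from_signals; infer_instance

-- ===== CLAIM (what is proved, stated in full; the proofs are below) =====
def Claim_equal_derive_risk_from_signals : Prop := ∀ (signal_codes : List String), Dom_derive_risk_from_signals signal_codes → Spec_derive_risk_from_signals signal_codes (derive_risk_from_signals signal_codes)

-- ===== LEMMAS AND PROOFS =====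

def sevRank (c : String) : Int := severityDict.getD c 0

def critL : List String :=
  ["credential_collection_surface", "safe_browsing_hit",
   "phishtank_verified_phish", "certificate_revoked"]
def highL : List String :=
  ["recent_registration", "mail_only_infrastructure",
   "brand_impersonation_content", "phishtank_in_database",
   "urlhaus_malware_listed", "high_spoofing_risk"]
def medL : List String :=
  ["fresh_registration", "live_http_surface", "unusual_hosting_country",
   "shielded_hosting_provider", "elevated_spoofing_risk"]

theorem critSet_eq : criticalSignals = critL := by decide
theorem highSet_eq : highSignals = highL := by decide
theorem medSet_eq : mediumSignals = medL := by decide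

theorem sevKeys_eq : severityDict.keys = critL ++ highL ++ medL := by decide

theorem sevRank_crit (c : String) (h : c ∈ critL) : sevRank c = 3 := by
  fin_cases h <;> decide

theorem sevRank_high (c : String) (h : c ∈ highL) : sevRank c = 2 := by
  fin_cases h <;> decide

theorem sevRank_med (c : String) (h : c ∈ medL) : sevRank c = 1 := by
  fin_cases h <;> decide

theorem sevRank_none (c : String) (h3 : c ∉ critL) (h2 : c ∉ highL) (h1 : c ∉ medL) :
    sevRank c = 0 := by
  have hc : severityDict.contains c = false := by
    rw [PySem.Dict.contains_eq_decide_mem_keys, sevKeys_eq]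
    simp [List.mem_append, h3, h2, h1]
  exact PySem.Dict.getD_of_not_contains _ _ hc

theorem sevRank_cases (c : String) :
    sevRank c = 3 ∨ sevRank c = 2 ∨ sevRank c = 1 ∨ sevRank c = 0 := by
  by_cases h3 : c ∈ critL
  · exact Or.inl (sevRank_crit c h3)
  by_cases h2 : c ∈ highL
  · exact Or.inr (Or.inl (sevRank_high c h2))
  by_cases h1 : c ∈ medL
  · exact Or.inr (Or.inr (Or.inl (sevRank_med c h1)))
  · exact Or.inr (Or.inr (Or.inr (sevRank_none c h3 h2 h1)))

theorem sevRank_nonneg (c : String) : 0 ≤ sevRank c := by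
  rcases sevRank_cases c with h | h | h | h <;> rw [h] <;> norm_num

theorem sevRank_le_three (c : String) : sevRank c ≤ 3 := by
  rcases sevRank_cases c with h | h | h | h <;> rw [h] <;> norm_num

theorem sevRank_le_two (c : String) (h3 : c ∉ critL) : sevRank c ≤ 2 := by
  by_cases h2 : c ∈ highL
  · rw [sevRank_high c h2]
  by_cases h1 : c ∈ medL
  · rw [sevRank_med c h1]; norm_num
  · rw [sevRank_none c h3 h2 h1]; norm_num

theorem sevRank_le_one (c : String) (h3 : c ∉ critL) (h2 : c ∉ highL) : sevRank c ≤ 1 := by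
  by_cases h1 : c ∈ medL
  · rw [sevRank_med c h1]
  · rw [sevRank_none c h3 h2 h1]; norm_num

def foldStep (worst : Int) (code : String) : Int := max worst (severityDict.getD code 0)

theorem fold_init_le (xs : List String) (a : Int) : a ≤ xs.foldl foldStep a := by
  induction xs generalizing a with
  | nil => simp [List.foldl]
  | cons x t ih =>
    calc a ≤ max a (severityDict.getD x 0) := le_max_left _ _
    _ ≤ _ := ih _

theorem fold_mem_le (xs : List String) (a : Int) (c : String) (h : c ∈ xs) :
    sevRank c ≤ xs.foldl foldStep a := by
  induction xs generalizing a with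
  | nil => cases h
  | cons x t ih =>
    rcases List.mem_cons.mp h with rfl | h'
    · exact le_trans (le_max_right _ _) (fold_init_le t _)
    · exact ih _ h'

theorem fold_le (xs : List String) (a n : Int) (ha : a ≤ n)
    (h : ∀ c ∈ xs, sevRank c ≤ n) : xs.foldl foldStep a ≤ n := by
  induction xs generalizing a with
  | nil => simpa [List.foldl] using ha
  | cons x t ih =>
    exact ih _ (max_le ha (h x (List.mem_cons_self ..)))
      (fun c hc => h c (List.mem_cons_of_mem _ hc))

theorem label3 : labelDict.getD 3 "low" = "critical" := by decide
theorem label2 : labelDict.getD 2 "low" = "high" := by decide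
theorem label1 : labelDict.getD 1 "low" = "medium" := by decide
theorem label0 : labelDict.getD 0 "low" = "low" := by decide

theorem derive_risk_from_signals_spec : Claim_equal_derive_risk_from_signals := by
  unfold Claim_equal_derive_risk_from_signals
  intro xs _
  unfold Spec_derive_risk_from_signals derive_risk_from_signals derive_risk_from_signals_alt
  rw [critSet_eq, highSet_eq, medSet_eq]
  simp only [List.any_eq_true, List.contains_iff_mem]
  have fold_eq : ∀ n : Int, (∃ c ∈ xs, sevRank c = n) → (∀ c ∈ xs, sevRank c ≤ n) →
      xs.foldl foldStep 0 = n := by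
    rintro n ⟨c, hc, hr⟩ hub
    exact le_antisymm (fold_le xs 0 n (hr ▸ sevRank_nonneg c) hub)
      (hr ▸ fold_mem_le xs 0 c hc)
  show _ = labelDict.getD (xs.foldl foldStep 0) "low"
  by_cases h3 : ∃ s ∈ critL, s ∈ xs
  · obtain ⟨s, hs, hx⟩ := h3
    have hM : xs.foldl foldStep 0 = 3 :=
      fold_eq 3 ⟨s, hx, sevRank_crit s hs⟩ (fun c _ => sevRank_le_three c)
    rw [hM, label3, if_pos ⟨s, hs, hx⟩]
  · by_cases h2 : ∃ s ∈ highL, s ∈ xs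
    · obtain ⟨s, hs, hx⟩ := h2
      have hM : xs.foldl foldStep 0 = 2 :=
        fold_eq 2 ⟨s, hx, sevRank_high s hs⟩
          (fun c hc => sevRank_le_two c (fun h => h3 ⟨c, h, hc⟩))
      rw [hM, label2, if_neg h3, if_pos ⟨s, hs, hx⟩]
    · by_cases h1 : ∃ s ∈ medL, s ∈ xs
      · obtain ⟨s, hs, hx⟩ := h1
        have hM : xs.foldl foldStep 0 = 1 :=
          fold_eq 1 ⟨s, hx, sevRank_med s hs⟩
            (fun c hc => sevRank_le_one c (fun h => h3 ⟨c, h, hc⟩) (fun h => h2 ⟨c, h, hc⟩))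
        rw [hM, label1, if_neg h3, if_neg h2, if_pos ⟨s, hs, hx⟩]
      · have hM : xs.foldl foldStep 0 = 0 := by
          refine le_antisymm (fold_le xs 0 0 le_rfl ?_) (fold_init_le xs 0)
          intro c hc
          rw [sevRank_none c (fun h => h3 ⟨c, h, hc⟩) (fun h => h2 ⟨c, h, hc⟩)
            (fun h => h1 ⟨c, h, hc⟩)]
        rw [hM, label0, if_neg h3, if_neg h2, if_neg h1]
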